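-- pv_equiv track=rewrite | github.com/hammern/high-school | 10th-grade/Python/Pycharm Projects/Nadav_List1Ex.py | front_x
-- ===== SOURCE A (Python) =====
-- def front_x(words):
--     x_list = []
--     normal_list = []
--     for word in words:
--         if word[0] == "x":
--             x_list.append(word)
--         else:
--             normal_list.append(word)
--     final_list = sorted(x_list) + sorted(normal_list)
--     return final_list
-- ===== SOURCE B (Python) =====
-- def front_x(words):
--     # One stable sort on a composite key: x-prefixed words (flag False) first, each group alphabetical.
--     return sorted(words, key=lambda w: (w[0] != "x", w))
-- ===== Notes on version B (the rewrite author's own statement) =====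
-- stated objective: idiomatic
-- what changed: Replaces the partition-into-two-lists loop followed by two sorts and a concatenation with a single stable sort of the whole list on the composite key (w[0] != 'x', w).
import Mathlib
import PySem

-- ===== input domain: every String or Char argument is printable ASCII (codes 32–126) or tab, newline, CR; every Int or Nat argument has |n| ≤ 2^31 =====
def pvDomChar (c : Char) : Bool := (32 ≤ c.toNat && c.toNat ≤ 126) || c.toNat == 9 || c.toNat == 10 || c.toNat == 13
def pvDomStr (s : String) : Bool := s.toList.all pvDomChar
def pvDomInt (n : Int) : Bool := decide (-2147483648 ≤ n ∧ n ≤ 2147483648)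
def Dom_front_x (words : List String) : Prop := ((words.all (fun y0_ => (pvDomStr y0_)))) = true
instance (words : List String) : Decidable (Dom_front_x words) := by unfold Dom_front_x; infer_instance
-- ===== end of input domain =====

-- B replaces A's partition-into-two-lists loop + two sorts + concatenation with a single
-- stable sort on the composite key (w[0] != 'x', w); same cost, more idiomatic.


-- ===== PORT A =====
-- literal transliteration of A: partition loop into x_list / normal_list, then sorted(x_list) + sorted(normal_list)
def front_x (words : List String) : List String :=
  let r := words.foldl
    (fun (acc : List String × List String) word =>
      if PySem.Str.pyGet? word 0 == some 'x' then (acc.1 ++ [word], acc.2)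
      else (acc.1, acc.2 ++ [word]))
    ([], [])
  PySem.List.sorted r.1 (fun x => x) false ++ PySem.List.sorted r.2 (fun x => x) false

-- ===== PORT B =====
-- literal transliteration of B: sorted(words, key=lambda w: (w[0] != "x", w)) — tuple key via sorted2
def front_x_alt (words : List String) : List String :=
  PySem.List.sorted2 words (fun w => decide (PySem.Str.pyGet? w 0 ≠ some 'x')) (fun w => w) false

-- ===== PRECONDITION & SPEC =====
-- Pre_ excludes lists containing the empty string: Python A raises IndexError on word[0] there (and B's key w[0] raises too).
def Pre_front_x (words : List String) : Prop := "" ∉ words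
instance (words : List String) : Decidable (Pre_front_x words) := by unfold Pre_front_x; infer_instance
def pvWitness_front_x : List String := ["xb", "apple", "xa", "zoo"]

def Spec_front_x (words : List String) (out : List String) : Prop := out = front_x_alt words
instance (words : List String) (out : List String) : Decidable (Spec_front_x words out) := by unfold Spec_front_x; infer_instance

-- ===== CLAIM (what is proved, stated in full; the proofs are below) =====
def Claim_equal_front_x : Prop := ∀ (words : List String), Dom_front_x words → Pre_front_x words → Spec_front_x words (front_x words)

-- ===== LEMMAS AND PROOFS =====

-- the boolean test A's loop branches on
def pvIsX (w : String) : Bool := PySem.Str.pyGet? w 0 == some 'x'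

-- B's composite key, as a single lexicographically ordered key
def pvKey (w : String) : Bool ×ₗ String := toLex (!pvIsX w, w)

lemma pvKey_injective : Function.Injective pvKey := by
  intro a b h
  exact (by simpa [pvKey, toLex, Prod.ext_iff] using h : _ ∧ a = b).2

-- A's partition loop produces the two filters
lemma front_x_eq_filters (words : List String) :
    front_x words =
      PySem.List.sorted (words.filter pvIsX) (fun x => x) false ++
      PySem.List.sorted (words.filter (fun w => !pvIsX w)) (fun x => x) false := by
  unfold front_x
  have hfun : (fun (acc : List String × List String) word =>
      if PySem.Str.pyGet? word 0 == some 'x' then (acc.1 ++ [word], acc.2)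
      else (acc.1, acc.2 ++ [word]))
      = (fun (acc : List String × List String) word =>
        (if pvIsX word then acc.1 ++ [word] else acc.1,
         if !pvIsX word then acc.2 ++ [word] else acc.2)) := by
    funext acc word
    by_cases h : pvIsX word = true <;> simp [pvIsX] at h <;> simp [pvIsX, h]
  rw [hfun,
      PySem.List.foldl_prod_mk (f := fun l w => if pvIsX w then l ++ [w] else l)
        (g := fun l w => if !pvIsX w then l ++ [w] else l),
      PySem.List.foldl_append_if_eq_filter, PySem.List.foldl_append_if_eq_filter]
  simp

-- B is insertion sort by the single lexicographic key pvKey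
lemma front_x_alt_eq_sorted (words : List String) :
    front_x_alt words = PySem.List.sorted words pvKey false := by
  unfold front_x_alt
  rw [PySem.List.sorted_eq_foldl_insertBy]
  simp only [PySem.List.sorted2]
  congr 1
  funext acc w
  congr 1
  funext a b
  by_cases hpa : PySem.List.pyGet? a.toList 0 = some 'x' <;>
    by_cases hpb : PySem.List.pyGet? b.toList 0 = some 'x' <;>
      simp [pvKey, pvIsX, Prod.Lex.lt_iff, hpa, hpb, decide_not, beq_eq_decide]

lemma key_le_of_mem_parts {a b : String}
    (ha : pvIsX a = true) (hb : pvIsX b = true) (hab : a ≤ b) : pvKey a ≤ pvKey b := by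
  simp [pvKey, Prod.Lex.le_iff, ha, hb, hab]

lemma key_le_of_mem_parts' {a b : String}
    (ha : pvIsX a = false) (hb : pvIsX b = false) (hab : a ≤ b) : pvKey a ≤ pvKey b := by
  simp [pvKey, Prod.Lex.le_iff, ha, hb, hab]

lemma key_le_cross {a b : String}
    (ha : pvIsX a = true) (hb : pvIsX b = false) : pvKey a ≤ pvKey b := by
  simp [pvKey, Prod.Lex.le_iff, ha, hb]

lemma front_x_pairwise (words : List String) :
    List.Pairwise (fun a b => pvKey a ≤ pvKey b) (front_x words) := by
  rw [front_x_eq_filters]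
  rw [List.pairwise_append]
  refine ⟨?_, ?_, ?_⟩
  · have hp := PySem.List.sorted_pairwise (words.filter pvIsX) (fun x => x)
    have hm := fun {x} (hx : x ∈ PySem.List.sorted (words.filter pvIsX) (fun x => x) false) =>
      (PySem.List.sorted_perm (words.filter pvIsX) (fun x => x) false).mem_iff.mp hx
    refine List.Pairwise.imp_of_mem ?_ hp
    intro a b hma hmb hab
    exact key_le_of_mem_parts (List.of_mem_filter (hm hma)) (List.of_mem_filter (hm hmb)) hab
  · have hp := PySem.List.sorted_pairwise (words.filter (fun w => !pvIsX w)) (fun x => x)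
    have hm := fun {x} (hx : x ∈ PySem.List.sorted (words.filter (fun w => !pvIsX w)) (fun x => x) false) =>
      (PySem.List.sorted_perm (words.filter (fun w => !pvIsX w)) (fun x => x) false).mem_iff.mp hx
    refine List.Pairwise.imp_of_mem ?_ hp
    intro a b hma hmb hab
    have ha := List.of_mem_filter (hm hma)
    have hb := List.of_mem_filter (hm hmb)
    simp only [Bool.not_eq_true'] at ha hb
    exact key_le_of_mem_parts' ha hb hab
  · intro a hma b hmb
    have ha := List.of_mem_filter
      ((PySem.List.sorted_perm (words.filter pvIsX) (fun x => x) false).mem_iff.mp hma)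
    have hb := List.of_mem_filter
      ((PySem.List.sorted_perm (words.filter (fun w => !pvIsX w)) (fun x => x) false).mem_iff.mp hmb)
    simp only [Bool.not_eq_true'] at hb
    exact key_le_cross ha hb

lemma front_x_perm (words : List String) : (front_x words).Perm words := by
  rw [front_x_eq_filters]
  exact ((PySem.List.sorted_perm _ _ _).append (PySem.List.sorted_perm _ _ _)).trans
    (List.filter_append_perm pvIsX words)

-- ===== VERDICT (by name: the statement is the Claim_ definition above) =====
theorem front_x_spec : Claim_equal_front_x := by
  intro words _hdom _hpre
  unfold Spec_front_x
  have hBpair : List.Pairwise (fun a b => pvKey a ≤ pvKey b) (front_x_alt words) := by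
    rw [front_x_alt_eq_sorted]
    exact PySem.List.sorted_pairwise words pvKey
  have hBperm : (front_x_alt words).Perm words :=
    PySem.List.sorted2_perm words _ _ false
  exact PySem.List.eq_of_perm_of_pairwise_le_of_injective pvKey pvKey_injective
    ((front_x_perm words).trans hBperm.symm) (front_x_pairwise words) hBpair
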